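-- pv_equiv track=rewrite | github.com/NobuyukiInoue/LeetCode | Problems/2000_2099/2085_Count_Common_Words_With_One_Occurrence/Project_Python3/Count_Common_Words_With_One_Occurrence.py | countWords2
-- ===== SOURCE A (Python) =====
-- import collections
-- from typing import List, Dict, Tuple
--
-- def countWords2(words1: List[str], words2: List[str]) -> int:
--     # 64ms
--     dic1 = collections.Counter(words1)
--     dic2 = collections.Counter(words2)
--     ans = 0
--     for k in dic1.keys():
--         if dic1[k] == dic2[k] == 1:
--             ans += 1
--     return ans
-- ===== SOURCE B (Python) =====
-- def countWords2(words1, words2):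
--     # Sort each list, scan runs to collect words occurring exactly once
--     # (already in increasing order), then count common words with a
--     # two-pointer merge. No dictionaries/Counters.
--     def once_sorted(words):
--         ws = sorted(words)
--         out = []
--         i = 0
--         n = len(ws)
--         while i < n:
--             j = i + 1
--             while j < n and ws[j] == ws[i]:
--                 j += 1
--             if j - i == 1:
--                 out.append(ws[i])
--             i = j
--         return out
--
--     s1 = once_sorted(words1)
--     s2 = once_sorted(words2)
--     i = j = ans = 0
--     while i < len(s1) and j < len(s2):
--         if s1[i] == s2[j]:
--             ans += 1
--             i += 1
--             j += 1
--         elif s1[i] < s2[j]: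
--             i += 1
--         else:
--             j += 1
--     return ans
-- ===== Notes on version B (the rewrite author's own statement) =====
-- stated objective: alternative
-- what changed: B uses no hash maps at all: it sorts each list, extracts the exactly-once words by a run-length scan of the sorted list, and counts common words with a two-pointer merge of the two sorted unique-word lists, instead of building two Counters and comparing counts key by key.
import Mathlib
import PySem

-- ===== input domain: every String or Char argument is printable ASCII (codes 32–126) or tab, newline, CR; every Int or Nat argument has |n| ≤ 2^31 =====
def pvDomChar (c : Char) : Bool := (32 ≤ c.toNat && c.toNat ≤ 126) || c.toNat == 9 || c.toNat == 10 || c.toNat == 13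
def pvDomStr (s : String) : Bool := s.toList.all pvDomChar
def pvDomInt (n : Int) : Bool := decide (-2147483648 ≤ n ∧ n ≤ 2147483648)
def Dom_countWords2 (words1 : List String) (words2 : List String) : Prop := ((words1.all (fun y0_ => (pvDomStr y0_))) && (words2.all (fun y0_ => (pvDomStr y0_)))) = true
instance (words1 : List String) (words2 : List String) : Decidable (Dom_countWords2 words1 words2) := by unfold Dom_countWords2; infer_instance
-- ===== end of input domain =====

-- B replaces A's Counter-and-key-loop by sort + run-length scan + two-pointer merge (alternative; no hash maps).

-- ===== PORT A =====
-- for k in dic1.keys(): if dic1[k] == dic2[k] == 1: ans += 1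
def countWords2 (words1 : List String) (words2 : List String) : Int :=
  let dic1 := PySem.Dict.counter words1
  let dic2 := PySem.Dict.counter words2
  dic1.keys.foldl (fun ans k => if dic1.getD k 0 = dic2.getD k 0 ∧ dic2.getD k 0 = 1 then ans + 1 else ans) 0

-- ===== PORT B =====
-- Source B's once_sorted inner loop: the run starting at i is the leading run of equal words
-- (takeWhile), the next i is the remainder (dropWhile); append ws[i] iff the run has length 1
def pyOnceScan : List String → List String
  | [] => []
  | x :: xs =>
    (if (xs.takeWhile (fun y => y == x)).length = 0 then [x] else [])
      ++ pyOnceScan (xs.dropWhile (fun y => y == x))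
termination_by ws => ws.length
decreasing_by
  have := List.length_dropWhile_le (fun y => y == x) xs
  simp; omega

-- Source B's two-pointer while loop over s1, s2
def pyMergeCount : List String → List String → Int
  | [], _ => 0
  | _ :: _, [] => 0
  | a :: as, b :: bs =>
    if a = b then pyMergeCount as bs + 1
    else if a < b then pyMergeCount as (b :: bs)
    else pyMergeCount (a :: as) bs
termination_by s1 s2 => s1.length + s2.length

def countWords2_alt (words1 : List String) (words2 : List String) : Int :=
  let s1 := pyOnceScan (PySem.List.sorted words1 (fun x => x) false)
  let s2 := pyOnceScan (PySem.List.sorted words2 (fun x => x) false)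
  pyMergeCount s1 s2

-- ===== PRECONDITION & SPEC =====
def Spec_countWords2 (words1 : List String) (words2 : List String) (out : Int) : Prop := out = countWords2_alt words1 words2
instance (words1 : List String) (words2 : List String) (out : Int) : Decidable (Spec_countWords2 words1 words2 out) := by unfold Spec_countWords2; infer_instance

-- ===== CLAIM (what is proved, stated in full; the proofs are below) =====
def Claim_equal_countWords2 : Prop := ∀ (words1 : List String) (words2 : List String), Dom_countWords2 words1 words2 → Spec_countWords2 words1 words2 (countWords2 words1 words2)

-- ===== LEMMAS AND PROOFS =====

-- in a sorted list x :: xs, everything after the leading run of x's is strictly greater than x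
lemma dropWhile_gt (x : String) (xs : List String)
    (hs : (x :: xs).Pairwise (· ≤ ·)) :
    ∀ y ∈ xs.dropWhile (fun y => y == x), x < y := by
  rcases List.pairwise_cons.mp hs with ⟨hx, hxs⟩
  cases hd : xs.dropWhile (fun y => y == x) with
  | nil => simp
  | cons h t =>
    have hsub : (h :: t).Sublist xs := hd ▸ (List.dropWhile_sublist _)
    have hph : ¬ ((h == x) = true) := by
      have := List.head?_dropWhile_not (fun y => y == x) xs
      rw [hd] at this; simpa using this
    have hhx : x < h :=
      lt_of_le_of_ne (hx h (hsub.subset (by simp))) (Ne.symm (fun e => hph (by simp [e])))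
    have hpt : (h :: t).Pairwise (· ≤ ·) := List.Pairwise.sublist hsub hxs
    intro y hy
    rcases List.mem_cons.mp hy with rfl | hy
    · exact hhx
    · exact lt_of_lt_of_le hhx ((List.pairwise_cons.mp hpt).1 y hy)

-- onceScan of a sorted list: membership is 'occurs exactly once', and it is strictly increasing
lemma pyOnceScan_spec (ws : List String) (hs : ws.Pairwise (· ≤ ·)) :
    (∀ y, y ∈ pyOnceScan ws ↔ ws.count y = 1) ∧ (pyOnceScan ws).Pairwise (· < ·) := by
  induction ws using pyOnceScan.induct with
  | case1 => simp [pyOnceScan]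
  | case2 x xs ih =>
    set run := xs.takeWhile (fun y => y == x) with hrun
    set rest := xs.dropWhile (fun y => y == x) with hrest
    have hgt : ∀ y ∈ rest, x < y := dropWhile_gt x xs hs
    have hrest_pw : rest.Pairwise (· ≤ ·) :=
      List.Pairwise.sublist (List.dropWhile_sublist _) (List.pairwise_cons.mp hs).2
    obtain ⟨ihmem, ihpw⟩ := ih hrest_pw
    have hsplit : xs = run ++ rest := (List.takeWhile_append_dropWhile).symm
    have hrunall : ∀ y ∈ run, y = x := by
      intro y hy
      have := List.mem_takeWhile_imp hy
      simpa using this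
    have hcx : (x :: xs).count x = run.length + 1 + rest.count x := by
      rw [hsplit]
      simp [List.count_append]
      rw [List.count_eq_length.mpr (fun y hy => (hrunall y hy).symm)]
      omega
    have hcxrest : rest.count x = 0 := by
      rw [List.count_eq_zero]
      intro h
      exact absurd rfl (ne_of_gt (hgt x h))
    have hsub : ∀ y ∈ pyOnceScan rest, y ∈ rest := fun y hy => by
      have := (ihmem y).mp hy
      exact List.count_pos_iff.mp (by omega)
    constructor
    · intro y
      rw [pyOnceScan]
      by_cases hxy : y = x
      · subst hxy
        have hnotrest : y ∉ pyOnceScan rest := fun h => absurd rfl (ne_of_gt (hgt y (hsub y h)))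
        by_cases h0 : run.length = 0
        · rw [if_pos h0]
          have h1 : (y :: xs).count y = 1 := by omega
          exact iff_of_true (by simp) h1
        · rw [if_neg h0]
          have h1 : (y :: xs).count y ≠ 1 := by omega
          simp only [List.nil_append]
          exact iff_of_false hnotrest h1
      · have hxy' : x ≠ y := fun e => hxy e.symm
        have hyrun : (x :: xs).count y = rest.count y := by
          rw [hsplit]
          simp [hxy', List.count_append,
                List.count_eq_zero.mpr (fun h => hxy (hrunall y h))]
        rw [hyrun, ← ihmem]
        simp only [List.mem_append, ← hrest]
        have : y ∉ (if run.length = 0 then [x] else []) := by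
          split <;> simp [hxy]
        exact or_iff_right this
    · rw [pyOnceScan]
      split
      · simp only [List.singleton_append, List.pairwise_cons]
        exact ⟨fun y hy => hgt y (hsub y hy), ihpw⟩
      · simpa using ihpw

-- two-pointer merge of strictly increasing lists counts the common elements
lemma pyMergeCount_spec (s1 s2 : List String)
    (h1 : s1.Pairwise (· < ·)) (h2 : s2.Pairwise (· < ·)) :
    pyMergeCount s1 s2 = ((s1.filter (fun a => decide (a ∈ s2))).length : Int) := by
  induction s1, s2 using pyMergeCount.induct with
  | case1 s2 => simp [pyMergeCount]
  | case2 a as => simp [pyMergeCount]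
  | case3 as a bs ih =>
    obtain ⟨ha, h1'⟩ := List.pairwise_cons.mp h1
    obtain ⟨hb, h2'⟩ := List.pairwise_cons.mp h2
    have hf : as.filter (fun x => decide (x ∈ a :: bs)) = as.filter (fun x => decide (x ∈ bs)) := by
      apply List.filter_congr
      intro x hx
      have hxa : x ≠ a := ne_of_gt (ha x hx)
      simp [hxa]
    rw [pyMergeCount, if_pos rfl, ih h1' h2', List.filter_cons_of_pos (by simp), hf]
    simp
  | case4 a as b bs hab hlt ih =>
    obtain ⟨ha, h1'⟩ := List.pairwise_cons.mp h1
    have hnotmem : a ∉ b :: bs := by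
      intro h
      rcases List.mem_cons.mp h with rfl | h
      · exact hab rfl
      · exact absurd hlt (not_lt_of_gt ((List.pairwise_cons.mp h2).1 a h))
    rw [pyMergeCount, if_neg hab, if_pos hlt, ih h1' h2,
        List.filter_cons_of_neg (by simpa using hnotmem)]
  | case5 a as b bs hab hlt ih =>
    obtain ⟨hb, h2'⟩ := List.pairwise_cons.mp h2
    have hgt : b < a := lt_of_le_of_ne (not_lt.mp hlt) (fun e => hab e.symm)
    have hf : (a :: as).filter (fun x => decide (x ∈ b :: bs)) = (a :: as).filter (fun x => decide (x ∈ bs)) := by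
      apply List.filter_congr
      intro x hx
      have hbx : b < x := by
        rcases List.mem_cons.mp hx with rfl | hx
        · exact hgt
        · exact lt_trans hgt ((List.pairwise_cons.mp h1).1 x hx)
      have hxb : x ≠ b := ne_of_gt hbx
      simp [hxb]
    rw [pyMergeCount, if_neg hab, if_neg hlt, ih h1 h2']
    rw [hf]

-- ===== VERDICT (by name: the statement is the Claim_ definition above) =====
theorem countWords2_spec : Claim_equal_countWords2 := by
  intro words1 words2 _
  show countWords2 words1 words2 = countWords2_alt words1 words2
  unfold countWords2 countWords2_alt
  obtain ⟨m1, p1⟩ := pyOnceScan_spec (PySem.List.sorted words1 (fun x => x) false)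
    (PySem.List.sorted_pairwise words1 (fun x => x))
  obtain ⟨m2, p2⟩ := pyOnceScan_spec (PySem.List.sorted words2 (fun x => x) false)
    (PySem.List.sorted_pairwise words2 (fun x => x))
  have hc1 : ∀ y, (PySem.List.sorted words1 (fun x => x) false).count y = words1.count y :=
    fun y => (PySem.List.sorted_perm words1 (fun x => x) false).count_eq y
  have hc2 : ∀ y, (PySem.List.sorted words2 (fun x => x) false).count y = words2.count y :=
    fun y => (PySem.List.sorted_perm words2 (fun x => x) false).count_eq y
  set s1 := pyOnceScan (PySem.List.sorted words1 (fun x => x) false) with hs1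
  set s2 := pyOnceScan (PySem.List.sorted words2 (fun x => x) false) with hs2
  simp only [PySem.List.foldl_ite_add_one, PySem.Dict.keys_counter, PySem.Dict.getD_counter,
    zero_add, pyMergeCount_spec s1 s2 p1 p2]
  have hbf : List.countP (fun a => decide (a ∈ s2)) s1
      = List.countP (fun a => decide (words2.count a = 1)) s1 :=
    List.countP_congr (fun x _ => by simp only [decide_eq_true_eq]; rw [m2, hc2])
  rw [← List.countP_eq_length_filter, hbf]
  have hperm : s1.Perm ((PySem.Set.ofList words1).filter (fun k => decide (words1.count k = 1))) := by
    rw [List.perm_ext_iff_of_nodup (p1.imp (fun h => ne_of_lt h))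
        ((PySem.Set.nodup_ofList words1).filter _)]
    intro a
    rw [List.mem_filter, m1, hc1, PySem.Set.mem_ofList]
    constructor
    · intro h; exact ⟨List.count_pos_iff.mp (by omega), by simpa using h⟩
    · intro ⟨_, h⟩; simpa using h
  rw [hperm.countP_eq, List.countP_filter]
  congr 1
  apply List.countP_congr
  intro k _
  simp only [decide_eq_true_eq, Bool.and_eq_true]
  omega
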